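-- pv_equiv track=rewrite | github.com/AnnaUstiuzhanina/y_lab | hw_2_tictactoe.py | new_field
-- ===== SOURCE A (Python) =====
-- from itertools import count as count_from
--
-- def new_field(vertical: int = 10, horizontal: int = 10) -> tuple:
--     '''
--     Генерация нового игрового поля и dict для поиска координат за O(1).
--
--     Аргументы:
--         gorizontal - длина строки
--         vertical - количество столбцов
--
--     Результат:
--         tuple - (<поле>, <dict для поиска координат>)
--     '''
--     count = count_from(1)
--     field, point_dict = [], {}
--
--     for i in range(vertical):
--         field.append([])
--         for j in range(horizontal):
--             number = str(next(count))
--             field[i].append(number)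
--             point_dict[number] = (i, j)
--
--     return field, point_dict
-- ===== SOURCE B (Python) =====
-- def new_field(vertical: int = 10, horizontal: int = 10) -> tuple:
--     """Flat construction: one 1-D pass produces all labels; the grid is carved
--     out of that flat list by slicing, and each label's coordinates come from
--     divmod on its flat index -- no nested row/column loops."""
--     total = max(vertical, 0) * max(horizontal, 0)
--     labels = [str(k + 1) for k in range(total)]
--     field = [labels[i * horizontal:(i + 1) * horizontal] for i in range(vertical)]
--     point_dict = {lab: divmod(k, horizontal) for k, lab in enumerate(labels)}
--     return field, point_dict
-- ===== Notes on version B (the rewrite author's own statement) =====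
-- stated objective: alternative
-- what changed: A's fused nested row/column loop driven by itertools.count is replaced by a flat construction: one 1-D pass builds all labels from the flat index, the grid rows are carved out of that flat list by slicing, and each label's coordinates are computed by divmod on its flat index instead of being carried by loop variables.
import Mathlib
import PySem

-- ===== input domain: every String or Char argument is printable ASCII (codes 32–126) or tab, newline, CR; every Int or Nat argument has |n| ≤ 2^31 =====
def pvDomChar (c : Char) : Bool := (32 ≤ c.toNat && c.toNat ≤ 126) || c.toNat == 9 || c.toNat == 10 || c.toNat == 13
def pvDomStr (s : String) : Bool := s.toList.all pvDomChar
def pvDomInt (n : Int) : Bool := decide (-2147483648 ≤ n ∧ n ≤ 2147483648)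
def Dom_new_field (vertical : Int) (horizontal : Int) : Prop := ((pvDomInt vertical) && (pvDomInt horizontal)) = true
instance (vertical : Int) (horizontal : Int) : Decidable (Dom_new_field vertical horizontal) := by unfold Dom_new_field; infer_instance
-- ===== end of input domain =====

-- B replaces A's fused counter-driven nested loop by a flat construction: one 1-D pass
-- of labels, rows carved out by slicing, coordinates recovered by divmod on the flat index.


-- ===== PORT A =====
-- state: (count, field, point_dict); 'field.append([])' followed by repeated
-- 'field[i].append(number)' is modelled by building row i (always the last row of field)
-- in the inner fold and appending it to field at the end of row i's loop.
def new_field (vertical : Int) (horizontal : Int) : List (List String) × (List (String × Int × Int)) :=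
  let st := (PySem.List.pyRange 0 vertical 1).foldl
    (fun (st : Int × List (List String) × PySem.Dict String (Int × Int)) i =>
      let inner := (PySem.List.pyRange 0 horizontal 1).foldl
        (fun (st2 : Int × List String × PySem.Dict String (Int × Int)) j =>
          let number := PySem.Int.toStr st2.1      -- number = str(next(count))
          (st2.1 + 1, st2.2.1 ++ [number], st2.2.2.insert number (i, j)))
        (st.1, [], st.2.2)
      (inner.1, st.2.1 ++ [inner.2.1], inner.2.2))
    (1, [], PySem.Dict.empty)
  (st.2.1, st.2.2.items)

-- ===== PORT B =====
-- divmod(k, horizontal) is ported as (floordiv, mod); the dict fold only runs when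
-- labels is non-empty, which forces horizontal > 0, so the divisor is never 0 there.
def new_field_alt (vertical : Int) (horizontal : Int) : List (List String) × (List (String × Int × Int)) :=
  let total := max vertical 0 * max horizontal 0
  let labels := (PySem.List.pyRange 0 total 1).map (fun k => PySem.Int.toStr (k + 1))
  let field := (PySem.List.pyRange 0 vertical 1).map (fun i =>
    PySem.List.slice labels (some (i * horizontal)) (some ((i + 1) * horizontal)))
  let point_dict := (PySem.List.enumerate labels 0).foldl
    (fun (d : PySem.Dict String (Int × Int)) kl =>
      d.insert kl.2 (PySem.Int.floordiv kl.1 horizontal, PySem.Int.mod kl.1 horizontal))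
    PySem.Dict.empty
  (field, point_dict.items)

-- ===== PRECONDITION & SPEC =====
def Spec_new_field (vertical : Int) (horizontal : Int) (out : List (List String) × (List (String × Int × Int))) : Prop := out = new_field_alt vertical horizontal
instance (vertical : Int) (horizontal : Int) (out : List (List String) × (List (String × Int × Int))) : Decidable (Spec_new_field vertical horizontal out) := by unfold Spec_new_field; infer_instance

-- ===== CLAIM (what is proved, stated in full; the proofs are below) =====
def Claim_equal_new_field : Prop := ∀ (vertical : Int) (horizontal : Int), Dom_new_field vertical horizontal → Spec_new_field vertical horizontal (new_field vertical horizontal)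

-- ===== LEMMAS AND PROOFS =====

-- A's inner row loop: at row i, column j the counter holds i*h + j + 1.
theorem pv_inner (i h : Int) : ∀ (a : Int) (row : List String)
    (d : PySem.Dict String (Int × Int)), 0 ≤ a →
    (PySem.List.pyRange a h 1).foldl
        (fun (st2 : Int × List String × PySem.Dict String (Int × Int)) j =>
          (st2.1 + 1, st2.2.1 ++ [PySem.Int.toStr st2.1],
            st2.2.2.insert (PySem.Int.toStr st2.1) (i, j)))
        (i * h + a + 1, row, d)
      = (i * h + max a h + 1,
         row ++ (PySem.List.pyRange a h 1).map (fun j => PySem.Int.toStr (i * h + j + 1)),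
         (PySem.List.pyRange a h 1).foldl
           (fun d2 j => d2.insert (PySem.Int.toStr (i * h + j + 1)) (i, j)) d) := by
  suffices key : ∀ (n : Nat) (a : Int) (row : List String)
      (d : PySem.Dict String (Int × Int)), (h - a).toNat = n → 0 ≤ a →
      (PySem.List.pyRange a h 1).foldl
        (fun (st2 : Int × List String × PySem.Dict String (Int × Int)) j =>
          (st2.1 + 1, st2.2.1 ++ [PySem.Int.toStr st2.1],
            st2.2.2.insert (PySem.Int.toStr st2.1) (i, j)))
        (i * h + a + 1, row, d)
      = (i * h + max a h + 1,
         row ++ (PySem.List.pyRange a h 1).map (fun j => PySem.Int.toStr (i * h + j + 1)),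
         (PySem.List.pyRange a h 1).foldl
           (fun d2 j => d2.insert (PySem.Int.toStr (i * h + j + 1)) (i, j)) d) by
    intro a row d ha; exact key _ a row d rfl ha
  intro n
  induction n with
  | zero =>
    intro a row d hn ha
    rw [PySem.List.pyRange_one_eq_nil (by omega)]
    simp only [List.foldl_nil, List.map_nil, List.append_nil]
    have : max a h = a := by omega
    rw [this]
  | succ n ih =>
    intro a row d hn ha
    rw [PySem.List.pyRange_one_cons (by omega)]
    simp only [List.foldl_cons, List.map_cons]
    have e1 : i * h + a + 1 + 1 = i * h + (a + 1) + 1 := by ring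
    rw [e1, ih (a + 1) _ _ (by omega) (by omega)]
    have e2 : max (a + 1) h = max a h := by omega
    simp [e2]

-- A's outer loop: at the start of row i the counter holds i*h + 1 (for 0 ≤ h).
theorem pv_outer (v h : Int) (h0 : 0 ≤ h) : ∀ (a : Int) (field : List (List String))
    (d : PySem.Dict String (Int × Int)), 0 ≤ a →
    (PySem.List.pyRange a v 1).foldl
      (fun (st : Int × List (List String) × PySem.Dict String (Int × Int)) i =>
        let inner := (PySem.List.pyRange 0 h 1).foldl
          (fun (st2 : Int × List String × PySem.Dict String (Int × Int)) j =>
            (st2.1 + 1, st2.2.1 ++ [PySem.Int.toStr st2.1],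
              st2.2.2.insert (PySem.Int.toStr st2.1) (i, j)))
          (st.1, [], st.2.2)
        (inner.1, st.2.1 ++ [inner.2.1], inner.2.2))
      (a * h + 1, field, d)
      = (max a v * h + 1,
         field ++ (PySem.List.pyRange a v 1).map (fun i =>
           (PySem.List.pyRange 0 h 1).map (fun j => PySem.Int.toStr (i * h + j + 1))),
         (PySem.List.pyRange a v 1).foldl
           (fun d2 i => (PySem.List.pyRange 0 h 1).foldl
             (fun d3 j => d3.insert (PySem.Int.toStr (i * h + j + 1)) (i, j)) d2) d) := by
  suffices key : ∀ (n : Nat) (a : Int) (field : List (List String))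
      (d : PySem.Dict String (Int × Int)), (v - a).toNat = n → 0 ≤ a →
      (PySem.List.pyRange a v 1).foldl
        (fun (st : Int × List (List String) × PySem.Dict String (Int × Int)) i =>
          let inner := (PySem.List.pyRange 0 h 1).foldl
            (fun (st2 : Int × List String × PySem.Dict String (Int × Int)) j =>
              (st2.1 + 1, st2.2.1 ++ [PySem.Int.toStr st2.1],
                st2.2.2.insert (PySem.Int.toStr st2.1) (i, j)))
            (st.1, [], st.2.2)
          (inner.1, st.2.1 ++ [inner.2.1], inner.2.2))
        (a * h + 1, field, d)
      = (max a v * h + 1,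
         field ++ (PySem.List.pyRange a v 1).map (fun i =>
           (PySem.List.pyRange 0 h 1).map (fun j => PySem.Int.toStr (i * h + j + 1))),
         (PySem.List.pyRange a v 1).foldl
           (fun d2 i => (PySem.List.pyRange 0 h 1).foldl
             (fun d3 j => d3.insert (PySem.Int.toStr (i * h + j + 1)) (i, j)) d2) d) by
    intro a field d ha; exact key _ a field d rfl ha
  intro n
  induction n with
  | zero =>
    intro a field d hn ha
    rw [show PySem.List.pyRange a v 1 = [] from PySem.List.pyRange_one_eq_nil (by omega)]
    simp only [List.foldl_nil, List.map_nil, List.append_nil]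
    have : max a v = a := by omega
    rw [this]
  | succ n ih =>
    intro a field d hn ha
    rw [show PySem.List.pyRange a v 1 = a :: PySem.List.pyRange (a+1) v 1 from
      PySem.List.pyRange_one_cons (by omega)]
    simp only [List.foldl_cons, List.map_cons]
    rw [show a * h + 1 = a * h + 0 + 1 by ring,
      pv_inner a h 0 [] d (le_refl 0)]
    simp only [List.nil_append]
    rw [show a * h + max 0 h + 1 = (a + 1) * h + 1 by
      rw [show max 0 h = h by omega]; ring]
    rw [ih (a + 1) _ _ (by omega) (by omega)]
    rw [show max (a + 1) v = max a v by omega]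
    simp

-- enumerate commutes with map on the values
theorem pv_enumerate_map {α β : Type} (f : α → β) (xs : List α) (s : Int) :
    PySem.List.enumerate (xs.map f) s
      = (PySem.List.enumerate xs s).map (fun p => (p.1, f p.2)) := by
  induction xs generalizing s with
  | nil => simp [PySem.List.enumerate_nil]
  | cons x xs ih => simp [PySem.List.enumerate_cons, ih]

-- enumerating a unit-step range from its own start pairs each element with itself
theorem pv_enumerate_pyRange (b : Int) : ∀ (a : Int),
    PySem.List.enumerate (PySem.List.pyRange a b 1) a
      = (PySem.List.pyRange a b 1).map (fun i => (i, i)) := by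
  suffices h : ∀ (n : Nat) (a : Int), (b - a).toNat = n →
      PySem.List.enumerate (PySem.List.pyRange a b 1) a
        = (PySem.List.pyRange a b 1).map (fun i => (i, i)) by
    intro a; exact h _ a rfl
  intro n
  induction n with
  | zero => intro a ha; rw [PySem.List.pyRange_one_eq_nil (by omega)]; simp [PySem.List.enumerate_nil]
  | succ n ih =>
    intro a ha
    rw [PySem.List.pyRange_one_cons (by omega)]
    simp only [PySem.List.enumerate_cons, List.map_cons]
    rw [ih (a + 1) (by omega)]

-- a unit-step range shifted to start at 0
theorem pv_pyRange_shift (a b : Int) :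
    PySem.List.pyRange a b 1 = (PySem.List.pyRange 0 (b - a) 1).map (fun k => a + k) := by
  rw [PySem.List.pyRange_one, PySem.List.pyRange_one]
  simp [List.map_map, Function.comp]

-- B's row i, for 0 < h and 0 ≤ i with (i+1)*h ≤ total: slicing the flat label list
-- yields exactly the labels i*h+1 … i*h+h.
theorem pv_row (h total i : Int) (hh : 0 < h) (_hi : 0 ≤ i) (htot : (i + 1) * h ≤ total) :
    PySem.List.slice ((PySem.List.pyRange 0 total 1).map (fun k => PySem.Int.toStr (k + 1)))
        (some (i * h)) (some ((i + 1) * h))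
      = (PySem.List.pyRange 0 h 1).map (fun j => PySem.Int.toStr (i * h + j + 1)) := by
  have h1 : (0:Int) ≤ i * h := by positivity
  have h2 : i * h ≤ (i + 1) * h := by nlinarith
  have e1 : (i + 1) * h = i * h + h := by ring
  rw [PySem.List.slice_toNat _ h1 (by omega)]
  rw [PySem.List.pyRange_one_append 0 (i * h) total h1 (by omega),
      PySem.List.pyRange_one_append (i * h) ((i + 1) * h) total h2 htot]
  have hlenA : ((PySem.List.pyRange 0 (i * h) 1).map
      (fun k => PySem.Int.toStr (k + 1))).length = (i * h).toNat := by
    simp [PySem.List.length_pyRange_one]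
  have hlenB : ((PySem.List.pyRange (i * h) ((i + 1) * h) 1).map
      (fun k => PySem.Int.toStr (k + 1))).length = h.toNat := by
    simp [PySem.List.length_pyRange_one]; omega
  rw [show ((i + 1) * h).toNat - (i * h).toNat = h.toNat by omega]
  rw [List.map_append, List.map_append,
    List.drop_append_of_le_length (by rw [hlenA]),
    ← hlenA, List.drop_length]
  simp only [List.nil_append]
  rw [← hlenB, List.take_append_of_le_length le_rfl, List.take_of_length_le le_rfl]
  rw [pv_pyRange_shift (i * h) ((i + 1) * h)]
  rw [show (i + 1) * h - i * h = h by ring]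
  simp only [List.map_map, Function.comp_def]

-- B's flat dict fold over one h-block equals A's inner insert loop for row i.
theorem pv_block (h i : Int) (hh : 0 < h) (hi : 0 ≤ i)
    (d : PySem.Dict String (Int × Int)) :
    (PySem.List.pyRange (i * h) ((i + 1) * h) 1).foldl
      (fun (d2 : PySem.Dict String (Int × Int)) k =>
        d2.insert (PySem.Int.toStr (k + 1)) (PySem.Int.floordiv k h, PySem.Int.mod k h)) d
    = (PySem.List.pyRange 0 h 1).foldl
        (fun d2 j => d2.insert (PySem.Int.toStr (i * h + j + 1)) (i, j)) d := by
  rw [pv_pyRange_shift (i * h) ((i + 1) * h),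
      show (i + 1) * h - i * h = h by ring, List.foldl_map]
  apply PySem.List.foldl_congr_mem
  intro d2 j hj
  rw [PySem.List.mem_pyRange_one] at hj
  have hfd : PySem.Int.floordiv (i * h + j) h = i := by
    rw [PySem.Int.floordiv_eq_iff_of_pos hh]
    constructor <;> nlinarith [hj.1, hj.2]
  have hmd : PySem.Int.mod (i * h + j) h = j := by
    have := PySem.Int.floordiv_mul_add_mod (i * h + j) h
    rw [hfd] at this; omega
  rw [hfd, hmd]

-- B's whole dict fold (flat, over v*h labels) equals A's nested dict fold, for 0 < h.
theorem pv_dict (h : Int) (hh : 0 < h) : ∀ (m : Nat) (d : PySem.Dict String (Int × Int)),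
    (PySem.List.pyRange 0 ((m : Int) * h) 1).foldl
      (fun (d2 : PySem.Dict String (Int × Int)) k =>
        d2.insert (PySem.Int.toStr (k + 1)) (PySem.Int.floordiv k h, PySem.Int.mod k h)) d
    = (PySem.List.pyRange 0 (m : Int) 1).foldl
        (fun d2 i => (PySem.List.pyRange 0 h 1).foldl
          (fun d3 j => d3.insert (PySem.Int.toStr (i * h + j + 1)) (i, j)) d2) d := by
  intro m
  induction m with
  | zero => intro d; simp [PySem.List.pyRange_one_eq_nil]
  | succ m ih =>
    intro d
    have hm : (0:Int) ≤ (m : Int) := by positivity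
    rw [show ((m + 1 : Nat) : Int) = (m : Int) + 1 by push_cast; ring]
    rw [PySem.List.pyRange_one_succ_right hm, List.foldl_append]
    rw [PySem.List.pyRange_one_append 0 ((m : Int) * h) (((m : Int) + 1) * h)
      (by positivity) (by nlinarith), List.foldl_append]
    rw [ih d, pv_block h (m : Int) hh hm]
    simp only [List.foldl_cons, List.foldl_nil]

-- slicing the empty list gives the empty list (any bounds)
theorem pv_slice_nil {α : Type} (a b : Int) :
    PySem.List.slice ([] : List α) (some a) (some b) = [] := by
  apply List.eq_nil_of_length_eq_zero
  have hl := PySem.List.length_slice ([] : List α) a b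
  have h1 := PySem.List.clampIdx_le ([] : List α).length b
  have h2 := PySem.List.clampIdx_le ([] : List α).length a
  simp only [List.length_nil] at hl h1 h2
  omega

theorem pv_main (v h : Int) : new_field v h = new_field_alt v h := by
  by_cases hv : 0 < v
  · by_cases hh : 0 < h
    · -- main case: both dimensions positive
      unfold new_field new_field_alt
      simp only
      have hout := pv_outer v h (le_of_lt hh) 0 [] PySem.Dict.empty (le_refl 0)
      rw [zero_mul, zero_add] at hout
      rw [hout]
      have hmv : max v 0 = v := by omega
      have hmh : max h 0 = h := by omega
      rw [hmv, hmh, show max 0 v = v by omega] at *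
      refine Prod.ext ?_ ?_
      · -- fields agree rowwise
        simp only [List.nil_append]
        apply List.map_congr_left
        intro i hi
        rw [PySem.List.mem_pyRange_one] at hi
        rw [pv_row h (v * h) i hh hi.1 (by nlinarith [hi.2])]
      · -- dicts agree
        obtain ⟨m, hm⟩ : ∃ m : Nat, v = (m : Int) := ⟨v.toNat, by omega⟩
        subst hm
        rw [pv_enumerate_map, pv_enumerate_pyRange ((m : Int) * h) 0, List.map_map,
          List.foldl_map]
        simp only [Function.comp]
        rw [pv_dict h hh m PySem.Dict.empty]
    · -- 0 < v, h ≤ 0: v empty rows, empty dict, on both sides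
      have hnil : PySem.List.pyRange 0 h 1 = [] := PySem.List.pyRange_one_eq_nil (by omega)
      have htot : max v 0 * max h 0 = 0 := by
        rw [show max h 0 = 0 by omega]; ring
      unfold new_field new_field_alt
      simp only [hnil, htot, List.foldl_nil]
      rw [show PySem.List.pyRange 0 0 1 = [] from PySem.List.pyRange_one_eq_nil le_rfl]
      simp only [List.map_nil, PySem.List.enumerate_nil, List.foldl_nil]
      have hfold : ∀ (l : List Int) (c : Int) (field : List (List String))
          (d : PySem.Dict String (Int × Int)),
          l.foldl (fun (st : Int × List (List String) × PySem.Dict String (Int × Int)) _ =>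
            (st.1, st.2.1 ++ [([] : List String)], st.2.2)) (c, field, d)
          = (c, field ++ l.map (fun _ => ([] : List String)), d) := by
        intro l; induction l with
        | nil => intro c field d; simp
        | cons x xs ih => intro c field d; simp only [List.foldl_cons, List.map_cons, ih]; simp
      rw [hfold]
      refine Prod.ext ?_ ?_
      · apply List.map_congr_left
        intro i _
        rw [pv_slice_nil]
      · rfl
  · -- v ≤ 0: outer range empty; total = 0 too
    have hnil : PySem.List.pyRange 0 v 1 = [] := PySem.List.pyRange_one_eq_nil (by omega)
    have htot : max v 0 * max h 0 = 0 := by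
      rw [show max v 0 = 0 by omega]; ring
    unfold new_field new_field_alt
    simp only [hnil, htot, List.foldl_nil, List.map_nil]
    rw [show PySem.List.pyRange 0 0 1 = [] from PySem.List.pyRange_one_eq_nil le_rfl]
    simp [PySem.List.enumerate_nil]

-- ===== VERDICT (by name: the statement is the Claim_ definition above) =====
theorem new_field_spec : Claim_equal_new_field := by
  intro v h _
  unfold Spec_new_field
  exact pv_main v h
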